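-- pv_equiv track=rewrite | github.com/eth-sri/learning-real-bug-detector | realbuglearn/data/rewrite.py | index_to_coord
-- ===== SOURCE A (Python) =====
-- def index_to_coord(s, index):
--     line, col = 1, 0
--     for i, c in enumerate(s):
--         if i == index: break
--         col += 1
--         if c == '\n':
--             line += 1
--             col = 0
--     return line, col
-- ===== SOURCE B (Python) =====
-- def index_to_coord(s, index):
--     lines = s[:index].split('\n')
--     return len(lines), len(lines[-1])
-- ===== Notes on version B (the rewrite author's own statement) =====
-- stated objective: faster
-- what changed: Replaces the char-by-char enumerate loop with slicing the prefix and splitting it on newlines (line = number of pieces, col = length of the last piece), done by C-level string methods; Pre_ excludes negative indices, a corner where A's full-string scan and B's Python from-the-end slice are both defensible readings.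
-- outside the precondition, e.g. on index_to_coord('ab\ncd', -1): A returns (2, 2), B returns (2, 1)
import Mathlib
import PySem

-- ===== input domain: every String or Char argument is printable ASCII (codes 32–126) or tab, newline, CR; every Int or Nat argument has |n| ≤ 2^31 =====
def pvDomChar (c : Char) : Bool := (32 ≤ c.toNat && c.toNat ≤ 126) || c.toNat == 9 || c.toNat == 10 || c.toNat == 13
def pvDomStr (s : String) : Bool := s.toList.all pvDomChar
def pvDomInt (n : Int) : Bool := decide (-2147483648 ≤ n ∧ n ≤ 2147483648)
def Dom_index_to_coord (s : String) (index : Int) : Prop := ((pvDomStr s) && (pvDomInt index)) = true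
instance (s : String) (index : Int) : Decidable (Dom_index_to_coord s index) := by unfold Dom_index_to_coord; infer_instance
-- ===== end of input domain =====

-- B replaces A's char-by-char scan with break by split-on-newline over the sliced prefix (idiomatic).

-- ===== PORT A =====
-- A's enumerate loop: i is the running index, (line, col) the running state; 'break' at i == index.
def loopA (index : Int) : List Char → Int → Int → Int → Int × Int
  | [], _, line, col => (line, col)
  | c :: rest, i, line, col =>
    if i == index then (line, col)
    else if c == '\n' then loopA index rest (i + 1) (line + 1) 0
    else loopA index rest (i + 1) line (col + 1)

def index_to_coord (s : String) (index : Int) : Int × Int :=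
  loopA index s.toList 0 1 0

-- ===== PORT B =====
-- lines = s[:index].split('\n'); return len(lines), len(lines[-1])
def index_to_coord_alt (s : String) (index : Int) : Int × Int :=
  let lines := PySem.Chars.splitOn (PySem.List.slice s.toList none (some index)) ['\n']
  ((lines.length : Int), (((PySem.List.pyGet? lines (-1)).getD []).length : Int))

-- ===== PRECONDITION & SPEC =====
-- Pre_ excludes negative indices: there A scans the whole string (end-of-string coordinate)
-- while B's Python slice counts from the end — a corner where either value is defensible.
def Pre_index_to_coord (s : String) (index : Int) : Prop := 0 ≤ index
instance (s : String) (index : Int) : Decidable (Pre_index_to_coord s index) := by unfold Pre_index_to_coord; infer_instance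
def pvWitness_index_to_coord : String × Int := ("ab\ncd", 4)

def Spec_index_to_coord (s : String) (index : Int) (out : Int × Int) : Prop := out = index_to_coord_alt s index
instance (s : String) (index : Int) (out : Int × Int) : Decidable (Spec_index_to_coord s index out) := by unfold Spec_index_to_coord; infer_instance

-- ===== CLAIM (what is proved, stated in full; the proofs are below) =====
def Claim_equal_index_to_coord : Prop := ∀ (s : String) (index : Int), Dom_index_to_coord s index → Pre_index_to_coord s index → Spec_index_to_coord s index (index_to_coord s index)

-- ===== LEMMAS AND PROOFS =====

-- Functional model of str.split('\n') with an explicit current piece.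
def mySplit : List Char → List Char → List (List Char)
  | pre, [] => [pre]
  | pre, x :: xs => if x = '\n' then pre :: mySplit [] xs else mySplit (pre ++ [x]) xs

theorem mySplit_ne_nil (pre l : List Char) : mySplit pre l ≠ [] := by
  induction l generalizing pre with
  | nil => simp [mySplit]
  | cons x xs ih => simp only [mySplit]; split_ifs <;> simp [ih]

theorem splitOn_go_eq : ∀ (fuel : Nat) (l cur : List Char) (accs : List (List Char)),
    l.length < fuel →
    PySem.Chars.splitOn.go ['\n'] fuel l cur accs = accs.reverse ++ mySplit cur.reverse l := by
  intro fuel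
  induction fuel with
  | zero => intro l cur accs h; omega
  | succ fuel ih =>
    intro l cur accs h
    cases l with
    | nil => simp [PySem.Chars.splitOn.go, mySplit]
    | cons x rest =>
      simp only [PySem.Chars.splitOn.go, List.isPrefixOf, Bool.and_true]
      by_cases hx : '\n' = x
      · subst hx
        simp only [beq_self_eq_true, if_true]
        rw [show List.drop (['\n'].length) ('\n' :: rest) = rest from rfl]
        rw [ih rest [] (cur.reverse :: accs) (by simpa using Nat.lt_of_succ_lt_succ h)]
        simp [mySplit]
      · simp only [beq_iff_eq, hx, if_false]
        rw [ih rest (x :: cur) accs (by simpa using Nat.lt_of_succ_lt_succ h)]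
        simp [mySplit, Ne.symm hx]

theorem splitOn_eq_mySplit (l : List Char) :
    PySem.Chars.splitOn l ['\n'] = mySplit [] l := by
  have := splitOn_go_eq (l.length + 1) l [] [] (by omega)
  simpa [PySem.Chars.splitOn] using this

-- The loop body of A once the break is out of the picture.
def gA : List Char → Int → Int → Int × Int
  | [], line, col => (line, col)
  | c :: rest, line, col =>
    if c = '\n' then gA rest (line + 1) 0 else gA rest line (col + 1)

theorem loopA_eq_gA (index : Int) : ∀ (l : List Char) (i line col : Int),
    loopA index l i line col =
      gA (if index < i then l else l.take (index - i).toNat) line col := by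
  intro l
  induction l with
  | nil => intro i line col; simp [loopA, gA]
  | cons c rest ih =>
    intro i line col
    by_cases hb : i = index
    · subst hb
      simp [loopA, gA]
    · have hne : (i == index) = false := by simpa using hb
      by_cases hlt : index < i
      · have hlt' : index < i + 1 := by omega
        by_cases hc : c = '\n'
        · simp [loopA, hne, hc, gA, hlt, hlt', ih]
        · simp [loopA, hne, hc, gA, hlt, hlt', ih]
      · have hgt : i < index := by omega
        have h1 : ¬ index < i + 1 := by omega
        have h2 : (index - i).toNat = ((index - (i + 1)).toNat) + 1 := by omega
        by_cases hc : c = '\n'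
        · simp [loopA, hne, hc, gA, hlt, h1, h2, ih, List.take_succ_cons]
        · simp [loopA, hne, hc, gA, hlt, h1, h2, ih, List.take_succ_cons]

theorem gA_eq_mySplit : ∀ (l pre : List Char) (line : Int),
    gA l line (pre.length : Int) =
      (line - 1 + ((mySplit pre l).length : Int), (((mySplit pre l).getLastD []).length : Int)) := by
  intro l
  induction l with
  | nil => intro pre line; simp [gA, mySplit]
  | cons x rest ih =>
    intro pre line
    by_cases hx : x = '\n'
    · have h0 : (0 : Int) = (([] : List Char).length : Int) := by simp
      simp only [gA, mySplit, hx, if_true]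
      rw [h0, ih [] (line + 1)]
      obtain ⟨m, ms, hm⟩ : ∃ m ms, mySplit [] rest = m :: ms := by
        cases hS : mySplit [] rest with
        | nil => exact absurd hS (mySplit_ne_nil [] rest)
        | cons m ms => exact ⟨m, ms, rfl⟩
      rw [hm]
      refine Prod.ext ?_ ?_
      · push_cast; simp
      · cases ms <;> simp [List.getLastD]
    · have h1 : (pre.length : Int) + 1 = ((pre ++ [x]).length : Int) := by simp
      simp only [gA, mySplit, hx, if_false]
      rw [h1, ih (pre ++ [x]) line]

theorem pyGet_neg_one_getLastD (l : List (List Char)) (h : l ≠ []) :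
    (PySem.List.pyGet? l (-1)).getD [] = l.getLastD [] := by
  have hlen : 0 < l.length := List.length_pos_iff.mpr h
  have h1 : PySem.List.pyIdx? l.length (-1) = some (l.length - 1) := by
    simp only [PySem.List.pyIdx?]
    split_ifs with h2 h3 h4
    · exact absurd h2 (by norm_num)
    · exact absurd h2 (by norm_num)
    · norm_num
    · exfalso; omega
  simp [PySem.List.pyGet?, h1, List.getLastD_eq_getLast?, List.getLast?_eq_getElem?]

-- ===== VERDICT (by name: the statement is the Claim_ definition above) =====
theorem index_to_coord_spec : Claim_equal_index_to_coord := by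
  intro s index _ hpre
  unfold Spec_index_to_coord
  simp only [index_to_coord, index_to_coord_alt]
  rw [PySem.List.slice_to _ hpre]
  have hA : loopA index s.toList 0 1 0 = gA (s.toList.take index.toNat) 1 0 := by
    rw [loopA_eq_gA]
    have : ¬ index < 0 := not_lt.mpr hpre
    simp [this]
  rw [hA]
  have h0 : (0 : Int) = (([] : List Char).length : Int) := by simp
  rw [h0, gA_eq_mySplit (s.toList.take index.toNat) [] 1, splitOn_eq_mySplit,
    pyGet_neg_one_getLastD _ (mySplit_ne_nil [] _)]
  norm_num
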